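-- pv_equiv track=rewrite | github.com/ajoer/rhein | simple_sweater/simple_sweater.py | _angled_armhole_bindoffs
-- ===== SOURCE A (Python) =====
-- import math
--
-- def _angled_armhole_bindoffs(armpit_rows, armpit_sts):
-- 	# Get the bind offs for angled bind off.
-- 	bindoffs = [0] * armpit_rows
-- 	for n in range(len(bindoffs)):
-- 		if n == 0:
-- 			bindoffs[n] = math.ceil(armpit_sts/2)
-- 			armpit_sts - bindoffs[n]
-- 		else:
-- 			bindoffs[n] = math.ceil((armpit_sts-sum(bindoffs))/2)
-- 			armpit_sts - bindoffs[n]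
-- 	bindoffs = [x for x in bindoffs if x != 0]
-- 	return bindoffs
-- ===== SOURCE B (Python) =====
-- def _angled_armhole_bindoffs(armpit_rows, armpit_sts):
--     # Closed form: A's remainder after k bind-offs is floor(armpit_sts / 2**k)
--     # (because r - ceil(r/2) == floor(r/2)), i.e. armpit_sts >> k, so bind-off
--     # number k is (armpit_sts >> k) - (armpit_sts >> (k + 1)).  Zeros only
--     # trail, so filtering them inside the comprehension matches A's filter.
--     return [(armpit_sts >> k) - (armpit_sts >> (k + 1))
--             for k in range(armpit_rows)
--             if (armpit_sts >> k) - (armpit_sts >> (k + 1)) != 0]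
-- ===== Notes on version B (the rewrite author's own statement) =====
-- stated objective: faster
-- what changed: B replaces A's stateful loop (mutating a list and re-summing it each iteration) by a closed form: the k-th bind-off is computed independently as (armpit_sts >> k) - (armpit_sts >> (k+1)), since A's remainder after k steps equals floor(armpit_sts/2^k); no list state or remainder is maintained.
import Mathlib
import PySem

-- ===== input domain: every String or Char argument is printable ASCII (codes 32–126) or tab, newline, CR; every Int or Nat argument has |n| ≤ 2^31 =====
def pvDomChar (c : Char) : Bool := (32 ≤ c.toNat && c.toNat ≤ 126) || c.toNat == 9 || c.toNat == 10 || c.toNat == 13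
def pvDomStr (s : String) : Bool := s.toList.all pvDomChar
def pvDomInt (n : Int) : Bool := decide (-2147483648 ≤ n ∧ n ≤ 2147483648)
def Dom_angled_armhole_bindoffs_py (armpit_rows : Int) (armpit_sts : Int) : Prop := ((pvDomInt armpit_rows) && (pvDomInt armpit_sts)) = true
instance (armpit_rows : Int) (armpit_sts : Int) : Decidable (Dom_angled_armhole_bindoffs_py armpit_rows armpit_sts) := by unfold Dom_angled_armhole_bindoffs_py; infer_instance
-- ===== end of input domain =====

-- B replaces A's stateful loop that re-sums the list each iteration by a closed
-- form: bind-off k is (armpit_sts >> k) - (armpit_sts >> (k+1)) (O(n^2) → O(n)).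

-- math.ceil(x/2) = -((-x) // 2): exact on Dom's ints (x/2 is an exact float there)
def pvCeilHalf (x : Int) : Int := -(PySem.Int.floordiv (-x) 2)

-- ===== PORT A =====
def angled_armhole_bindoffs_py (armpit_rows : Int) (armpit_sts : Int) : List Int :=
  let bindoffs : List Int := List.replicate armpit_rows.toNat 0     -- [0] * armpit_rows
  let bindoffs :=
    (PySem.List.pyRange 0 (PySem.List.len bindoffs) 1).foldl (fun bs n =>
      if n = 0 then
        PySem.List.pySetD bs n (pvCeilHalf armpit_sts)             -- bindoffs[n] = ceil(armpit_sts/2)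
        -- 'armpit_sts - bindoffs[n]' is a discarded expression (no effect): not ported
      else
        PySem.List.pySetD bs n (pvCeilHalf (armpit_sts - bs.sum))) -- bindoffs[n] = ceil((armpit_sts - sum)/2)
      bindoffs
  bindoffs.filter (fun x => x != 0)                                -- [x for x in bindoffs if x != 0]

-- ===== PORT B =====
-- Python's arithmetic right shift s >> k (0 ≤ k): exactly floor(s / 2^k)
def pvShr (s : Int) (k : Int) : Int := PySem.Int.floordiv s (2 ^ k.toNat)

def angled_armhole_bindoffs_py_alt (armpit_rows : Int) (armpit_sts : Int) : List Int :=
  -- [(s >> k) - (s >> (k+1)) for k in range(armpit_rows) if (s >> k) - (s >> (k+1)) != 0]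
  (PySem.List.pyRange 0 armpit_rows 1).filterMap (fun k =>
    let b := pvShr armpit_sts k - pvShr armpit_sts (k + 1)
    if b ≠ 0 then some b else none)

-- ===== PRECONDITION & SPEC =====
def Spec_angled_armhole_bindoffs_py (armpit_rows : Int) (armpit_sts : Int) (out : List Int) : Prop := out = angled_armhole_bindoffs_py_alt armpit_rows armpit_sts
instance (armpit_rows : Int) (armpit_sts : Int) (out : List Int) : Decidable (Spec_angled_armhole_bindoffs_py armpit_rows armpit_sts out) := by unfold Spec_angled_armhole_bindoffs_py; infer_instance

-- ===== CLAIM (what is proved, stated in full; the proofs are below) =====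
def Claim_equal_angled_armhole_bindoffs_py : Prop := ∀ (armpit_rows : Int) (armpit_sts : Int), Dom_angled_armhole_bindoffs_py armpit_rows armpit_sts → Spec_angled_armhole_bindoffs_py armpit_rows armpit_sts (angled_armhole_bindoffs_py armpit_rows armpit_sts)

-- ===== LEMMAS AND PROOFS =====

-- the full sequence of remainder-halvings A stores in the list (including the 0s it later filters out)
def pvGen (fuel : Nat) (rem : Int) : List Int :=
  match fuel with
  | 0 => []
  | f + 1 => pvCeilHalf rem :: pvGen f (rem - pvCeilHalf rem)

lemma pvLoopA (f : Nat) : ∀ (k : Nat) (s rem : Int) (front : List Int),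
    front.length = k → 1 ≤ k → front.sum = s - rem →
    (PySem.List.pyRange (k : Int) ((k + f : Nat) : Int) 1).foldl
      (fun bs n =>
        if n = 0 then PySem.List.pySetD bs n (pvCeilHalf s)
        else PySem.List.pySetD bs n (pvCeilHalf (s - bs.sum)))
      (front ++ List.replicate f 0)
    = front ++ pvGen f rem := by
  induction f with
  | zero =>
    intro k s rem front hlen hk hsum
    rw [PySem.List.pyRange_one_eq_nil (by push_cast; omega)]
    simp [pvGen]
  | succ f ih =>
    intro k s rem front hlen hk hsum
    rw [PySem.List.pyRange_one_cons (by push_cast; omega)]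
    simp only [List.foldl_cons]
    rw [if_neg (by omega)]
    have hsum2 : (front ++ List.replicate (f + 1) (0 : Int)).sum = s - rem := by
      simpa using hsum
    rw [hsum2]
    have hset : PySem.List.pySetD (front ++ List.replicate (f + 1) (0 : Int)) (k : Int)
        (pvCeilHalf (s - (s - rem))) = (front ++ [pvCeilHalf rem]) ++ List.replicate f 0 := by
      rw [PySem.List.pySetD_natCast]
      have : (List.replicate (f + 1) (0 : Int)) = 0 :: List.replicate f 0 := rfl
      rw [this, ← hlen, List.set_append_right _ _ (le_refl _)]
      simp
    rw [hset]
    have hcast : ((k : Int) + 1) = ((k + 1 : Nat) : Int) := by push_cast; ring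
    have hcast2 : ((k + (f + 1) : Nat) : Int) = (((k + 1) + f : Nat) : Int) := by push_cast; ring
    rw [hcast, hcast2,
      ih (k + 1) s (rem - pvCeilHalf rem) (front ++ [pvCeilHalf rem])
        (by simp [hlen]) (by omega) (by simp [hsum]; ring)]
    simp [pvGen]

lemma pvA_eq_filter_gen (armpit_rows armpit_sts : Int) :
    angled_armhole_bindoffs_py armpit_rows armpit_sts
      = (pvGen armpit_rows.toNat armpit_sts).filter (fun x => x != 0) := by
  unfold angled_armhole_bindoffs_py
  simp only [PySem.List.len_eq, List.length_replicate]
  cases hR : armpit_rows.toNat with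
  | zero =>
    rw [PySem.List.pyRange_one_eq_nil (by simp)]
    simp [pvGen]
  | succ f =>
    rw [PySem.List.pyRange_one_cons (by push_cast; omega)]
    simp only [List.foldl_cons]
    rw [if_pos trivial]
    have hset : PySem.List.pySetD (List.replicate (f + 1) (0 : Int)) 0 (pvCeilHalf armpit_sts)
        = [pvCeilHalf armpit_sts] ++ List.replicate f 0 := by
      have h0 : ((0 : Int)) = ((0 : Nat) : Int) := rfl
      rw [h0, PySem.List.pySetD_natCast]
      rfl
    rw [hset]
    have h1 : ((0 : Int) + 1) = ((1 : Nat) : Int) := by norm_num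
    have h2 : ((f + 1 : Nat) : Int) = ((1 + f : Nat) : Int) := by push_cast; ring
    rw [h1, h2,
      pvLoopA f 1 armpit_sts (armpit_sts - pvCeilHalf armpit_sts) [pvCeilHalf armpit_sts]
        (by simp) (le_refl _) (by simp)]
    simp [pvGen]

-- ceil(r/2) = r - floor(r/2)
lemma pvCeilHalf_eq (r : Int) : pvCeilHalf r = r - PySem.Int.floordiv r 2 := by
  unfold pvCeilHalf
  rw [PySem.Int.floordiv_eq_ediv_of_pos (by norm_num),
      PySem.Int.floordiv_eq_ediv_of_pos (by norm_num)]
  omega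

-- halving steps the shift: floor(floor(s/2)/2^k) = floor(s/2^(k+1))
lemma pvShr_half (s : Int) (k : Nat) :
    PySem.Int.floordiv (PySem.Int.floordiv s 2) (2 ^ k) = PySem.Int.floordiv s (2 ^ (k + 1)) := by
  rw [PySem.Int.floordiv_eq_ediv_of_pos (by norm_num),
      PySem.Int.floordiv_eq_ediv_of_pos (by positivity),
      PySem.Int.floordiv_eq_ediv_of_pos (by positivity),
      Int.ediv_ediv_of_nonneg (by norm_num)]
  norm_num [pow_succ, mul_comm]

-- pvGen in closed form: entry k is floor(s/2^k) - floor(s/2^(k+1))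
lemma pvGen_closed (f : Nat) : ∀ (s : Int),
    pvGen f s = (List.range f).map
      (fun k => PySem.Int.floordiv s (2 ^ k) - PySem.Int.floordiv s (2 ^ (k + 1))) := by
  induction f with
  | zero => intro s; simp [pvGen]
  | succ f ih =>
    intro s
    rw [List.range_succ_eq_map]
    simp only [pvGen, List.map_cons, List.map_map]
    congr 1
    · rw [pvCeilHalf_eq]
      have h0 : PySem.Int.floordiv s (2 ^ 0) = s := by
        rw [PySem.Int.floordiv_eq_ediv_of_pos (by norm_num)]; simp
      rw [h0]; norm_num
    · have hrem : s - pvCeilHalf s = PySem.Int.floordiv s 2 := by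
        rw [pvCeilHalf_eq]; ring
      rw [hrem, ih]
      apply List.map_congr_left
      intro k _
      simp only [Function.comp_apply, Nat.succ_eq_add_one, pvShr_half]

-- filterMap with an if-some guard is filter-of-map
lemma pvFilterMap_if {α : Type} (l : List α) (g : α → Int) :
    l.filterMap (fun k => if g k = 0 then none else some (g k))
      = (l.map g).filter (fun x => x != 0) := by
  induction l with
  | nil => simp
  | cons a l ih =>
    simp only [List.filterMap_cons, List.map_cons, List.filter_cons]
    by_cases h : g a = 0 <;> simp [h, ih]

-- B's filterMap over pyRange is the filter of the closed-form map
lemma pvB_eq_filter_map (armpit_rows armpit_sts : Int) :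
    angled_armhole_bindoffs_py_alt armpit_rows armpit_sts
      = ((List.range armpit_rows.toNat).map
          (fun k => PySem.Int.floordiv armpit_sts (2 ^ k)
                    - PySem.Int.floordiv armpit_sts (2 ^ (k + 1)))).filter
          (fun x => x != 0) := by
  unfold angled_armhole_bindoffs_py_alt
  rw [PySem.List.pyRange_one, List.filterMap_map]
  have hn : (armpit_rows - 0).toNat = armpit_rows.toNat := by simp
  rw [hn, ← pvFilterMap_if]
  apply List.filterMap_congr
  intro k _
  have h1 : pvShr armpit_sts (0 + (k : Int)) = PySem.Int.floordiv armpit_sts (2 ^ k) := by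
    simp [pvShr]
  have h2 : pvShr armpit_sts (0 + (k : Int) + 1) = PySem.Int.floordiv armpit_sts (2 ^ (k + 1)) := by
    have ht : ((0 : Int) + (k : Int) + 1).toNat = k + 1 := by omega
    rw [pvShr, ht]
  simp only [Function.comp_apply, h1, h2, ne_eq, ite_not]

-- ===== VERDICT (by name: the statement is the Claim_ definition above) =====
theorem angled_armhole_bindoffs_py_spec : Claim_equal_angled_armhole_bindoffs_py := by
  intro armpit_rows armpit_sts _
  unfold Spec_angled_armhole_bindoffs_py
  rw [pvA_eq_filter_gen, pvB_eq_filter_map, pvGen_closed]
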